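-- pv_equiv track=rewrite | github.com/MedusaSH/PyWaf-Client | app/security/headless_detector.py | get_headless_type
-- ===== SOURCE A (Python) =====
-- from typing import Dict, Optional, Tuple
--
-- def get_headless_type(detection_result: Dict[str, any]) -> Optional[str]:
--     indicators = detection_result.get("indicators", [])
--
--     if any("puppeteer" in ind for ind in indicators):
--         return "puppeteer"
--     elif any("selenium" in ind for ind in indicators):
--         return "selenium"
--     elif any("playwright" in ind for ind in indicators):
--         return "playwright"
--     elif any("webdriver" in ind for ind in indicators):
--         return "webdriver"
--     elif any("automation" in ind for ind in indicators):
--         return "automation"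
--
--     return None
-- ===== SOURCE B (Python) =====
-- def get_headless_type(detection_result):
--     indicators = detection_result.get("indicators", [])
--     keywords = ("puppeteer", "selenium", "playwright", "webdriver", "automation")
--     found = set()
--     for ind in indicators:
--         for kw in keywords:
--             if kw in ind:
--                 found.add(kw)
--     for kw in keywords:
--         if kw in found:
--             return kw
--     return None
-- ===== Notes on version B (the rewrite author's own statement) =====
-- stated objective: alternative
-- what changed: Instead of five separate any(...) scans over the indicator list with early return, B makes a single pass over the indicators collecting every matched keyword into a set, then returns the first keyword of the fixed priority order present in that set.
import Mathlib
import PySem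

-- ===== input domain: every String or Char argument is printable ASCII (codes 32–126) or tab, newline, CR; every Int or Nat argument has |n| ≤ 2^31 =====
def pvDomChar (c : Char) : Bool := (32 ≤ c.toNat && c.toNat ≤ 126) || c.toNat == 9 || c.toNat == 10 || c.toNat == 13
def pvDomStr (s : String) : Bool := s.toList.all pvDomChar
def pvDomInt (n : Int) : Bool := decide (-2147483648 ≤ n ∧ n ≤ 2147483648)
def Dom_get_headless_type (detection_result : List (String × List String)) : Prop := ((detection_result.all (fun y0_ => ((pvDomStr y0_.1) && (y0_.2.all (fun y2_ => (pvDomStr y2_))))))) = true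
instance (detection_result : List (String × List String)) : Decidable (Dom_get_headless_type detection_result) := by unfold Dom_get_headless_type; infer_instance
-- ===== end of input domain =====

-- B replaces A's five repeated any(...) scans by a single pass that collects matched keywords
-- into a set, then a fixed priority lookup; same cost, alternative algorithm.
-- ===== PORT A =====
def get_headless_type (detection_result : List (String × List String)) : Option String :=
  let indicators := PySem.Dict.getD ⟨detection_result⟩ "indicators" []
  if indicators.any (fun ind => PySem.Str.isIn "puppeteer" ind) then some "puppeteer"
  else if indicators.any (fun ind => PySem.Str.isIn "selenium" ind) then some "selenium"
  else if indicators.any (fun ind => PySem.Str.isIn "playwright" ind) then some "playwright"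
  else if indicators.any (fun ind => PySem.Str.isIn "webdriver" ind) then some "webdriver"
  else if indicators.any (fun ind => PySem.Str.isIn "automation" ind) then some "automation"
  else none

-- ===== PORT B =====
def pvKeywords : List String := ["puppeteer", "selenium", "playwright", "webdriver", "automation"]

def get_headless_type_alt (detection_result : List (String × List String)) : Option String :=
  let indicators := PySem.Dict.getD ⟨detection_result⟩ "indicators" []
  let found : PySem.Set String := indicators.foldl
    (fun s ind => pvKeywords.foldl
      (fun t kw => if PySem.Str.isIn kw ind then PySem.Set.add t kw else t) s)
    PySem.Set.empty
  pvKeywords.find? (fun kw => PySem.Set.contains found kw)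

-- ===== PRECONDITION & SPEC =====
def Spec_get_headless_type (detection_result : List (String × List String)) (out : Option String) : Prop := out = get_headless_type_alt detection_result
instance (detection_result : List (String × List String)) (out : Option String) : Decidable (Spec_get_headless_type detection_result out) := by unfold Spec_get_headless_type; infer_instance

-- ===== CLAIM (what is proved, stated in full; the proofs are below) =====
def Claim_equal_get_headless_type : Prop := ∀ (detection_result : List (String × List String)), Dom_get_headless_type detection_result → Spec_get_headless_type detection_result (get_headless_type detection_result)

-- ===== LEMMAS AND PROOFS =====

-- ===== VERDICT (by name: the statement is the Claim_ definition above) =====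
-- kw is in the inner fold's result iff it was in s already, or it is a keyword occurring in ind
lemma pv_inner_mem (kws : List String) (ind : String) (s : PySem.Set String) (kw : String) :
    kw ∈ kws.foldl (fun t k => if PySem.Str.isIn k ind then PySem.Set.add t k else t) s ↔
      kw ∈ s ∨ (kw ∈ kws ∧ PySem.Str.isIn kw ind = true) := by
  induction kws generalizing s with
  | nil => simp
  | cons k rest ih =>
    simp only [List.foldl_cons, ih, List.mem_cons]
    by_cases h : PySem.Str.isIn k ind = true
    · simp only [h, if_pos]
      rw [PySem.Set.mem_add]
      constructor
      · rintro ((hs | rfl) | hr)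
        · exact Or.inl hs
        · exact Or.inr ⟨Or.inl rfl, h⟩
        · exact Or.inr ⟨Or.inr hr.1, hr.2⟩
      · rintro (hs | ⟨(rfl | hm), hi⟩)
        · exact Or.inl (Or.inl hs)
        · exact Or.inl (Or.inr rfl)
        · exact Or.inr ⟨hm, hi⟩
    · simp only [if_neg h]
      constructor
      · rintro (hs | hr)
        · exact Or.inl hs
        · exact Or.inr ⟨Or.inr hr.1, hr.2⟩
      · rintro (hs | ⟨(rfl | hm), hi⟩)
        · exact Or.inl hs
        · exact absurd hi h
        · exact Or.inr ⟨hm, hi⟩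

-- the whole fold: kw is in 'found' iff it is a keyword and some indicator contains it
lemma pv_found_mem (kws inds : List String) (s : PySem.Set String) (kw : String) :
    kw ∈ inds.foldl
        (fun s ind => kws.foldl
          (fun t k => if PySem.Str.isIn k ind then PySem.Set.add t k else t) s) s ↔
      kw ∈ s ∨ (kw ∈ kws ∧ ∃ ind ∈ inds, PySem.Str.isIn kw ind = true) := by
  induction inds generalizing s with
  | nil => simp
  | cons ind rest ih =>
    simp only [List.foldl_cons, ih, pv_inner_mem, List.mem_cons]
    constructor
    · rintro ((hs | ⟨hk, hi⟩) | ⟨hk, ind', hm, hi⟩)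
      · exact Or.inl hs
      · exact Or.inr ⟨hk, ind, Or.inl rfl, hi⟩
      · exact Or.inr ⟨hk, ind', Or.inr hm, hi⟩
    · rintro (hs | ⟨hk, ind', (rfl | hm), hi⟩)
      · exact Or.inl (Or.inl hs)
      · exact Or.inl (Or.inr ⟨hk, hi⟩)
      · exact Or.inr ⟨hk, ind', hm, hi⟩

lemma pv_contains_found (kws inds : List String) (kw : String) (hkw : kw ∈ kws) :
    PySem.Set.contains
      (inds.foldl
        (fun s ind => kws.foldl
          (fun t k => if PySem.Str.isIn k ind then PySem.Set.add t k else t) s)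
        PySem.Set.empty) kw
      = inds.any (fun ind => PySem.Str.isIn kw ind) := by
  have h := pv_found_mem kws inds PySem.Set.empty kw
  by_cases hc : ∃ ind ∈ inds, PySem.Str.isIn kw ind = true
  · have hm : kw ∈ _ := h.mpr (Or.inr ⟨hkw, hc⟩)
    rw [Bool.eq_iff_iff, PySem.Set.contains]
    simp only [List.contains_iff_mem, List.any_eq_true]
    exact ⟨fun _ => hc, fun _ => hm⟩
  · have hm : kw ∉ _ := fun hx => by
      rcases h.mp hx with hs | ⟨_, hc'⟩
      · simp [PySem.Set.empty] at hs
      · exact hc hc'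
    rw [Bool.eq_iff_iff, PySem.Set.contains]
    simp only [List.contains_iff_mem, List.any_eq_true]
    exact ⟨fun hx => absurd hx hm, fun hx => absurd hx hc⟩

-- ===== VERDICT (by name: the statement is the Claim_ definition above) =====
theorem get_headless_type_spec : Claim_equal_get_headless_type := by
  intro d _
  unfold Spec_get_headless_type get_headless_type get_headless_type_alt
  simp only [pvKeywords, List.find?]
  rw [pv_contains_found _ _ _ (by simp),
      pv_contains_found _ _ _ (by simp),
      pv_contains_found _ _ _ (by simp),
      pv_contains_found _ _ _ (by simp),
      pv_contains_found _ _ _ (by simp)]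
  split_ifs <;> simp_all only [Bool.not_eq_true]
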